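-- pv_equiv track=rewrite | github.com/tkeaty/L1_HC | l1hc.py | unprune_new_cands
-- ===== SOURCE A (Python) =====
-- def add_edge(edge_list, p, c, mode=1):
--     """
--     Adds an edge to the given list
--     :param edge_list: a dictionary of format {p: (c, mode)}
--     :param p: identifier of the parent (source) node of the new edge
--     :param c: identifier of the child (sink) node of the new edge
--     :param mode: 1 = add, 0 = delete, -1 = reverse
--     :return: the new edge list
--     """
--     if p in edge_list:
--         edge_list[p].append((c, mode))
--     else:
--         edge_list[p] = [(c, mode)]
--
--     return edge_list
--
-- def remove_edge(edge_list, p, c, mode):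
--     """
--     Remove an edge from the edge list
--     :param edge_list: a dictionary of format {p: (c, mode)}
--     :param p: identifier of the parent (source) node of the new edge
--     :param c: identifier of the child (sink) node of the new edge
--     :param mode: 1 = add, 0 = delete, -1 = reverse
--     :return: the new edge list
--     """
--     if len(edge_list[p]) <= 1:
--         del edge_list[p]
--     else:
--         edge_list[p].remove((c, mode))
--
--     return edge_list
--
-- def unprune_new_cands(prune, cand, new_c):
--     """
--     Un-prune edges with the newly added child node
--     :param prune: edge list
--     :param cand: edge list
--     :param new_c: newly added child node
--     :return: prune, cand
--     """
--     discard = {}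
--     for p, children in prune.items():
--         for cm in children:
--             if cm[0] == new_c:
--                 cand = add_edge(cand, p, cm[0], cm[1])
--                 discard = add_edge(discard, p, cm[0], cm[1])
--
--     for p, children in discard.items():
--         for cm in children:
--             prune = remove_edge(prune, p, cm[0], cm[1])
--
--     return prune, cand
-- ===== SOURCE B (Python) =====
-- def unprune_new_cands(prune, cand, new_c):
--     """
--     Un-prune edges with the newly added child node, in one filtering pass:
--     rebuild prune keeping only non-matching edges, routing matching edges into cand.
--     A parent is dropped only when it had edges and all of them matched.
--     Returns a fresh prune dict (A mutates prune in place); cand is mutated like A's.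
--     """
--     new_prune = {}
--     for p, children in prune.items():
--         kept = []
--         for cm in children:
--             if cm[0] == new_c:
--                 cand.setdefault(p, []).append((cm[0], cm[1]))
--             else:
--                 kept.append(cm)
--         if kept or not children:
--             new_prune[p] = kept
--     return new_prune, cand
-- ===== Notes on version B (the rewrite author's own statement) =====
-- stated objective: simpler
-- what changed: A collects matching edges into a discard dict and then runs a second removal pass calling remove_edge (a linear list.remove per discarded edge); B does one filtering pass over prune that rebuilds each parent's kept-children list and routes matching edges to cand directly, dropping the discard dict and the removal pass entirely.
import Mathlib
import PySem

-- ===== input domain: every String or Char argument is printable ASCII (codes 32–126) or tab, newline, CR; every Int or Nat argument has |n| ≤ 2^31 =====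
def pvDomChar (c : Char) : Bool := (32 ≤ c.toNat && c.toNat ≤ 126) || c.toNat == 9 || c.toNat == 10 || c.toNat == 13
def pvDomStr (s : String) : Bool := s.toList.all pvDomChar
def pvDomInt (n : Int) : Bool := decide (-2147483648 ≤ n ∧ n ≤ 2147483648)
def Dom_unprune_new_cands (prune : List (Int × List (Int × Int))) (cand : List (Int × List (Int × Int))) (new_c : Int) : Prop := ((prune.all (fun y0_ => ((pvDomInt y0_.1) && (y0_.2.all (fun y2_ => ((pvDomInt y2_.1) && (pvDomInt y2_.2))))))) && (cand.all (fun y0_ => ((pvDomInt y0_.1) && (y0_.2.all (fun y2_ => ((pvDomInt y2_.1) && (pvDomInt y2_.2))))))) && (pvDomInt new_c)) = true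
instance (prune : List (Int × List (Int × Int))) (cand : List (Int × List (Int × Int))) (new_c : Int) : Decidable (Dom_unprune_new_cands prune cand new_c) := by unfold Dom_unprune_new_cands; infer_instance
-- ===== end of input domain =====

-- B replaces A's collect-into-discard-then-remove two-pass scheme by a single filtering pass
-- (prune is rebuilt, matching edges routed to cand); return values agree — side effects differ:
-- A mutates prune in place while B returns a fresh prune dict (cand is mutated by both alike).

-- ===== PORT A =====
-- add_edge: append (c, mode) under key p, creating the key if absent
def pvAddEdgeA (el : PySem.Dict Int (List (Int × Int))) (p c mode : Int) :
    PySem.Dict Int (List (Int × Int)) :=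
  if el.contains p then el.modify p [] (fun cs => cs ++ [(c, mode)])
  else el.insert p [(c, mode)]

-- remove_edge: A only ever calls it with p present and (c, mode) in the list,
-- so the getD defaults (Python: KeyError / ValueError) are unreachable in A
def pvRemoveEdgeA (el : PySem.Dict Int (List (Int × Int))) (p c mode : Int) :
    PySem.Dict Int (List (Int × Int)) :=
  if (el.getD p []).length ≤ 1 then el.erase p
  else el.modify p [] (fun cs => (PySem.List.remove? cs (c, mode)).getD cs)

def unprune_new_cands (prune : List (Int × List (Int × Int))) (cand : List (Int × List (Int × Int))) (new_c : Int) : (List (Int × List (Int × Int))) × (List (Int × List (Int × Int))) :=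
  let pruneD := PySem.Dict.mk prune
  -- first loop: collect matching edges into cand and discard
  let st := pruneD.items.foldl
    (fun (st : PySem.Dict Int (List (Int × Int)) × PySem.Dict Int (List (Int × Int))) pc =>
      pc.2.foldl
        (fun st cm =>
          if cm.1 == new_c then (pvAddEdgeA st.1 pc.1 cm.1 cm.2, pvAddEdgeA st.2 pc.1 cm.1 cm.2)
          else st) st)
    (PySem.Dict.mk cand, PySem.Dict.mk [])
  -- second loop: remove every discarded edge from prune
  let pruneF := st.2.items.foldl
    (fun pr pc => pc.2.foldl (fun pr cm => pvRemoveEdgeA pr pc.1 cm.1 cm.2) pr) pruneD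
  (pruneF.items, st.1.items)

-- ===== PORT B =====
def unprune_new_cands_alt (prune : List (Int × List (Int × Int))) (cand : List (Int × List (Int × Int))) (new_c : Int) : (List (Int × List (Int × Int))) × (List (Int × List (Int × Int))) :=
  let st := prune.foldl
    (fun (st : PySem.Dict Int (List (Int × Int)) × PySem.Dict Int (List (Int × Int))) pc =>
      -- inner pass: route matching edges to cand (cand.setdefault(p, []).append(cm)), keep the rest
      let r := pc.2.foldl
        (fun (r : PySem.Dict Int (List (Int × Int)) × List (Int × Int)) cm =>
          if cm.1 == new_c then (r.1.modify pc.1 [] (fun cs => cs ++ [(cm.1, cm.2)]), r.2)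
          else (r.1, r.2 ++ [cm])) (st.2, [])
      (if ¬(r.2 = []) ∨ pc.2 = [] then st.1.insert pc.1 r.2 else st.1, r.1))
    (PySem.Dict.mk [], PySem.Dict.mk cand)
  (st.1.items, st.2.items)

-- ===== PRECONDITION & SPEC =====
-- The dict-typed arguments are represented as association lists; Pre_ excludes lists with
-- duplicate parent keys, which no Python dict argument can produce (dict() collapses them).
def Pre_unprune_new_cands (prune : List (Int × List (Int × Int))) (cand : List (Int × List (Int × Int))) (new_c : Int) : Prop :=
  (prune.map Prod.fst).Nodup ∧ (cand.map Prod.fst).Nodup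
instance (prune : List (Int × List (Int × Int))) (cand : List (Int × List (Int × Int))) (new_c : Int) : Decidable (Pre_unprune_new_cands prune cand new_c) := by unfold Pre_unprune_new_cands; infer_instance
def pvWitness_unprune_new_cands : (List (Int × List (Int × Int))) × (List (Int × List (Int × Int))) × Int :=
  ([(1, [(2, 1), (4, 0)]), (3, [(2, 0)])], [(5, [(2, 1)])], 2)

def Spec_unprune_new_cands (prune : List (Int × List (Int × Int))) (cand : List (Int × List (Int × Int))) (new_c : Int) (out : (List (Int × List (Int × Int))) × (List (Int × List (Int × Int)))) : Prop := out = unprune_new_cands_alt prune cand new_c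
instance (prune : List (Int × List (Int × Int))) (cand : List (Int × List (Int × Int))) (new_c : Int) (out : (List (Int × List (Int × Int))) × (List (Int × List (Int × Int)))) : Decidable (Spec_unprune_new_cands prune cand new_c out) := by unfold Spec_unprune_new_cands; infer_instance

-- ===== CLAIM (what is proved, stated in full; the proofs are below) =====
def Claim_equal_unprune_new_cands : Prop := ∀ (prune : List (Int × List (Int × Int))) (cand : List (Int × List (Int × Int))) (new_c : Int), Dom_unprune_new_cands prune cand new_c → Pre_unprune_new_cands prune cand new_c → Spec_unprune_new_cands prune cand new_c (unprune_new_cands prune cand new_c)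


-- ===== LEMMAS AND PROOFS =====

-- the per-parent cand/discard accumulation both programs perform over a parent's children
def pvAcc (new_c : Int) (cd : PySem.Dict Int (List (Int × Int))) (pc : Int × List (Int × Int)) :
    PySem.Dict Int (List (Int × Int)) :=
  pc.2.foldl
    (fun cd cm => if cm.1 == new_c then cd.modify pc.1 [] (fun cs => cs ++ [(cm.1, cm.2)]) else cd) cd

def pvKept (new_c : Int) (l : List (Int × Int)) : List (Int × Int) :=
  l.filter (fun cm => !(cm.1 == new_c))

def pvMs (new_c : Int) (l : List (Int × Int)) : List (Int × Int) :=
  l.filter (fun cm => cm.1 == new_c)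

-- B's per-parent rebuild step of prune
def pvNpStep (new_c : Int) (np : PySem.Dict Int (List (Int × Int))) (pc : Int × List (Int × Int)) :
    PySem.Dict Int (List (Int × Int)) :=
  if ¬(pvKept new_c pc.2 = []) ∨ pc.2 = [] then np.insert pc.1 (pvKept new_c pc.2) else np

def pvBCell (new_c : Int) (pc : Int × List (Int × Int)) : Option (Int × List (Int × Int)) :=
  if pvKept new_c pc.2 = [] ∧ pc.2 ≠ [] then none else some (pc.1, pvKept new_c pc.2)

def pvDCell (new_c : Int) (pc : Int × List (Int × Int)) : Option (Int × List (Int × Int)) :=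
  if pvMs new_c pc.2 = [] then none else some (pc.1, pvMs new_c pc.2)

lemma pvAddEdgeA_eq_modify (el : PySem.Dict Int (List (Int × Int))) (p c m : Int) :
    pvAddEdgeA el p c m = el.modify p [] (fun cs => cs ++ [(c, m)]) := by
  unfold pvAddEdgeA PySem.Dict.modify
  by_cases h : el.contains p = true
  · simp [h]
  · simp [h, PySem.Dict.getD_of_not_contains el [] (by simpa using h)]

lemma pvFind_mid (pre : List (Int × List (Int × Int))) (post : List (Int × List (Int × Int)))
    (p : Int) (v : List (Int × Int)) (h : ∀ c ∈ pre, (c.1 == p) = false) :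
    List.find? (fun c => c.1 == p) (pre ++ (p, v) :: post) = some (p, v) := by
  induction pre with
  | nil => simp
  | cons a pre ih =>
      rw [List.cons_append, List.find?_cons_of_neg (by simpa using h a (by simp))]
      exact ih (fun c hc => h c (by simp [hc]))

lemma pvGetD_mid (pre post : List (Int × List (Int × Int))) (p : Int) (v : List (Int × Int))
    (h : ∀ c ∈ pre, (c.1 == p) = false) :
    (PySem.Dict.mk (pre ++ (p, v) :: post)).getD p [] = v := by
  simp [PySem.Dict.getD, PySem.Dict.get?, pvFind_mid pre post p v h]

lemma pvContains_mid (pre post : List (Int × List (Int × Int))) (p : Int) (v : List (Int × Int)) :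
    (PySem.Dict.mk (pre ++ (p, v) :: post)).contains p = true := by
  simp [PySem.Dict.contains]

lemma pvInsert_mid (pre post : List (Int × List (Int × Int))) (p : Int) (v w : List (Int × Int))
    (h : ∀ c ∈ pre, (c.1 == p) = false) (h' : ∀ c ∈ post, (c.1 == p) = false) :
    (PySem.Dict.mk (pre ++ (p, v) :: post)).insert p w = PySem.Dict.mk (pre ++ (p, w) :: post) := by
  unfold PySem.Dict.insert
  rw [if_pos (pvContains_mid pre post p v)]
  congr 1
  have hmap : ∀ (xs : List (Int × List (Int × Int))), (∀ c ∈ xs, (c.1 == p) = false) →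
      xs.map (fun c => if (c.1 == p) = true then (p, w) else c) = xs := by
    intro xs hx
    induction xs with
    | nil => rfl
    | cons a xs ih =>
        rw [List.map_cons, if_neg (by have := hx a (by simp); simpa using this),
          ih (fun c hc => hx c (List.mem_cons_of_mem a hc))]
  rw [List.map_append, List.map_cons, hmap pre h, hmap post h']
  simp

lemma pvErase_mid (pre post : List (Int × List (Int × Int))) (p : Int) (v : List (Int × Int))
    (h : ∀ c ∈ pre, (c.1 == p) = false) (h' : ∀ c ∈ post, (c.1 == p) = false) :
    (PySem.Dict.mk (pre ++ (p, v) :: post)).erase p = PySem.Dict.mk (pre ++ post) := by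
  unfold PySem.Dict.erase
  congr 1
  simp only [List.filter_append, List.filter_cons, BEq.rfl, Bool.not_true]
  rw [List.filter_eq_self.mpr (fun c hc => by simp [h c hc]),
      List.filter_eq_self.mpr (fun c hc => by simp [h' c hc])]
  simp

lemma pvModify_mid (pre post : List (Int × List (Int × Int))) (p : Int) (v : List (Int × Int))
    (f : List (Int × Int) → List (Int × Int))
    (h : ∀ c ∈ pre, (c.1 == p) = false) (h' : ∀ c ∈ post, (c.1 == p) = false) :
    (PySem.Dict.mk (pre ++ (p, v) :: post)).modify p [] f = PySem.Dict.mk (pre ++ (p, f v) :: post) := by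
  unfold PySem.Dict.modify
  rw [pvGetD_mid pre post p v h, pvInsert_mid pre post p v (f v) h h']

lemma pvRemove_mid (kept t : List (Int × Int)) (m : Int × Int) (hm : m ∉ kept) :
    PySem.List.remove? (kept ++ m :: t) m = some (kept ++ t) := by
  induction kept with
  | nil => simp [PySem.List.remove?_cons_self]
  | cons a kept ih =>
      rw [List.cons_append,
        PySem.List.remove?_cons_of_ne _ (by rintro rfl; exact hm (by simp)),
        ih (fun hmem => hm (by simp [hmem]))]
      rfl

lemma pvFilterNil_of_msNil (new_c : Int) (l : List (Int × Int)) (h : pvMs new_c l = []) :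
    pvKept new_c l = l := by
  refine List.filter_eq_self.mpr (fun c hc => ?_)
  have := List.filter_eq_nil_iff.mp h c hc
  simpa using this

lemma pvNil_of_both_nil (new_c : Int) (l : List (Int × Int))
    (h1 : pvMs new_c l = []) (h2 : pvKept new_c l = []) : l = [] := by
  have := pvFilterNil_of_msNil new_c l h1
  rw [this] at h2; exact h2

-- the discard dict built for one parent: a fold of in-place appends under one key
lemma pvD1t (p : Int) : ∀ (ms : List (Int × Int)) (its : List (Int × List (Int × Int)))
    (v : List (Int × Int)), (∀ c ∈ its, (c.1 == p) = false) →
    (ms.foldl (fun d cm => d.modify p [] (fun cs => cs ++ [cm])) (PySem.Dict.mk (its ++ [(p, v)])))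
      = PySem.Dict.mk (its ++ [(p, v ++ ms)]) := by
  intro ms
  induction ms with
  | nil => intro its v h; simp
  | cons m rest ih =>
      intro its v h
      rw [List.foldl_cons, pvModify_mid its [] p v _ h (by simp), ih its (v ++ [m]) h]
      simp

lemma pvD1 (p : Int) (ms : List (Int × Int)) (d : PySem.Dict Int (List (Int × Int)))
    (h : d.contains p = false) :
    (ms.foldl (fun d cm => d.modify p [] (fun cs => cs ++ [cm])) d)
      = PySem.Dict.mk (d.items ++ (if ms = [] then [] else [(p, ms)])) := by
  have hall : ∀ c ∈ d.items, (c.1 == p) = false := by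
    intro c hc
    by_contra hne
    have : d.contains p = true := by
      unfold PySem.Dict.contains
      exact List.any_eq_true.mpr ⟨c, hc, by simpa using hne⟩
    simp [this] at h
  cases ms with
  | nil => cases d; simp
  | cons m rest =>
      rw [List.foldl_cons]
      have hstep : d.modify p [] (fun cs => cs ++ [m]) = PySem.Dict.mk (d.items ++ [(p, [m])]) := by
        unfold PySem.Dict.modify
        rw [PySem.Dict.getD_of_not_contains d [] h]
        cases d
        exact congrArg PySem.Dict.mk (PySem.Dict.items_insert_of_not_contains _ _ h)
      rw [hstep, pvD1t p rest d.items [m] hall]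
      simp

-- the whole discard dict: one cell per parent that has matching edges, in prune order
lemma pvDisc_items (new_c : Int) : ∀ (l : List (Int × List (Int × Int)))
    (acc : PySem.Dict Int (List (Int × Int))),
    (l.map Prod.fst).Nodup → (∀ q ∈ l.map Prod.fst, acc.contains q = false) →
    (l.foldl (pvAcc new_c) acc) = PySem.Dict.mk (acc.items ++ l.filterMap (pvDCell new_c)) := by
  intro l
  induction l with
  | nil => intro acc _ _; cases acc; simp
  | cons pc rest ih =>
      intro acc hnd hacc
      obtain ⟨p, children⟩ := pc
      have hstep : pvAcc new_c acc (p, children)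
          = PySem.Dict.mk (acc.items ++ (if pvMs new_c children = [] then [] else [(p, pvMs new_c children)])) := by
        unfold pvAcc
        have hcongr : children.foldl
            (fun cd cm => if cm.1 == new_c then cd.modify p [] (fun cs => cs ++ [(cm.1, cm.2)]) else cd) acc
            = children.foldl
            (fun cd cm => if cm.1 == new_c then cd.modify p [] (fun cs => cs ++ [cm]) else cd) acc :=
          PySem.List.foldl_congr_mem _ _ _ _ (fun acc cm _ => rfl)
        rw [hcongr, ← List.foldl_filter, pvD1 p _ acc (hacc p (by simp))]
        rfl
      rw [List.foldl_cons, hstep, ih _ (by simpa using hnd.of_cons) ?hfresh]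
      · simp only [List.filterMap_cons]
        unfold pvDCell
        by_cases hms : pvMs new_c children = [] <;> simp [hms]
      case hfresh =>
        intro q hq
        have hqp : (p == q) = false := by
          have : p ∉ rest.map Prod.fst := by
            have := hnd; simp only [List.map_cons, List.nodup_cons] at this; exact this.1
          simp only [beq_eq_false_iff_ne]; rintro rfl; exact this hq
        unfold PySem.Dict.contains at hacc ⊢
        simp only [List.any_append, Bool.or_eq_false_iff]
        refine ⟨by simpa using hacc q (by simp [hq]), ?_⟩
        by_cases hms : pvMs new_c children = [] <;> simp [hms, hqp]

-- B's rebuilt prune: one cell per parent with kept (or originally empty) children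
lemma pvNp_items (new_c : Int) : ∀ (l : List (Int × List (Int × Int)))
    (acc : PySem.Dict Int (List (Int × Int))),
    (l.map Prod.fst).Nodup → (∀ q ∈ l.map Prod.fst, acc.contains q = false) →
    (l.foldl (pvNpStep new_c) acc) = PySem.Dict.mk (acc.items ++ l.filterMap (pvBCell new_c)) := by
  intro l
  induction l with
  | nil => intro acc _ _; cases acc; simp
  | cons pc rest ih =>
      intro acc hnd hacc
      obtain ⟨p, children⟩ := pc
      have hp : p ∉ rest.map Prod.fst := by
        have := hnd; simp only [List.map_cons, List.nodup_cons] at this; exact this.1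
      by_cases hc : ¬(pvKept new_c children = []) ∨ children = []
      · have hstep : pvNpStep new_c acc (p, children)
            = PySem.Dict.mk (acc.items ++ [(p, pvKept new_c children)]) := by
          unfold pvNpStep
          rw [if_pos hc]
          cases acc
          exact congrArg PySem.Dict.mk
            (PySem.Dict.items_insert_of_not_contains _ _ (hacc p (by simp)))
        rw [List.foldl_cons, hstep, ih _ (by simpa using hnd.of_cons) ?hfresh]
        · simp only [List.filterMap_cons]
          unfold pvBCell
          rw [if_neg (by tauto)]
          simp
        case hfresh =>
          intro q hq
          have hqp : (p == q) = false := by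
            simp only [beq_eq_false_iff_ne]; rintro rfl; exact hp hq
          unfold PySem.Dict.contains at hacc ⊢
          simp only [List.any_append, Bool.or_eq_false_iff]
          exact ⟨by simpa using hacc q (by simp [hq]), by simp [hqp]⟩
      · have hstep : pvNpStep new_c acc (p, children) = acc := by
          unfold pvNpStep; rw [if_neg hc]
        rw [List.foldl_cons, hstep, ih _ (by simpa using hnd.of_cons)
              (fun q hq => hacc q (by simp [hq]))]
        simp only [List.filterMap_cons]
        unfold pvBCell
        rw [if_pos (by tauto)]

-- A's removal loop for one parent: removing every matching edge filters (or deletes) the cell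
lemma pvR1 (new_c p : Int) : ∀ (l kept : List (Int × Int))
    (pre post : List (Int × List (Int × Int))),
    (∀ c ∈ pre, (c.1 == p) = false) → (∀ c ∈ post, (c.1 == p) = false) →
    (∀ x ∈ kept, (x.1 == new_c) = false) →
    ((pvMs new_c l).foldl (fun pr cm => pvRemoveEdgeA pr p cm.1 cm.2)
        (PySem.Dict.mk (pre ++ (p, kept ++ l) :: post)))
      = PySem.Dict.mk (pre ++
          (if kept ++ pvKept new_c l = [] ∧ pvMs new_c l ≠ [] then []
           else [(p, kept ++ pvKept new_c l)]) ++ post) := by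
  intro l
  induction l with
  | nil => intro kept pre post h h' hk; simp [pvMs, pvKept]
  | cons m t ih =>
      intro kept pre post h h' hk
      by_cases hm : (m.1 == new_c) = true
      · have hms : pvMs new_c (m :: t) = m :: pvMs new_c t := by
          simp [pvMs, hm]
        have hkeq : pvKept new_c (m :: t) = pvKept new_c t := by
          simp [pvKept, hm]
        rw [hms, hkeq, List.foldl_cons]
        have hget : (PySem.Dict.mk (pre ++ (p, kept ++ m :: t) :: post)).getD p [] = kept ++ m :: t :=
          pvGetD_mid pre post p _ h
        by_cases hsmall : (kept ++ m :: t).length ≤ 1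
        · have hlen : kept.length = 0 ∧ t.length = 0 := by
            simp only [List.length_append, List.length_cons] at hsmall; omega
          obtain ⟨hk1, ht1⟩ := hlen
          have hk0 : kept = [] := List.eq_nil_of_length_eq_zero hk1
          have ht0 : t = [] := List.eq_nil_of_length_eq_zero ht1
          subst hk0; subst ht0
          have hstep : pvRemoveEdgeA (PySem.Dict.mk (pre ++ (p, ([] : List (Int × Int)) ++ m :: []) :: post)) p m.1 m.2
              = PySem.Dict.mk (pre ++ post) := by
            unfold pvRemoveEdgeA
            rw [if_pos (by rw [pvGetD_mid pre post p _ h]; simp)]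
            exact pvErase_mid pre post p _ h h'
          rw [hstep]
          simp [pvMs, pvKept]
        · have hmk : m ∉ kept := fun hmem => by simp [hk m hmem] at hm
          have hstep : pvRemoveEdgeA (PySem.Dict.mk (pre ++ (p, kept ++ m :: t) :: post)) p m.1 m.2
              = PySem.Dict.mk (pre ++ (p, kept ++ t) :: post) := by
            unfold pvRemoveEdgeA
            rw [if_neg (by rw [hget]; exact hsmall)]
            rw [pvModify_mid pre post p _ _ h h']
            have hval : (PySem.List.remove? (kept ++ m :: t) (m.1, m.2)).getD (kept ++ m :: t)
                = kept ++ t := by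
              rw [Prod.mk.eta, pvRemove_mid kept t m hmk]
              rfl
            rw [hval]
          rw [hstep, ih kept pre post h h' hk]
          by_cases hend : kept ++ pvKept new_c t = []
          · have hkn : kept = [] ∧ pvKept new_c t = [] := by
              simpa using hend
            have hms' : pvMs new_c t ≠ [] := by
              intro habs
              have ht0 := pvNil_of_both_nil new_c t habs hkn.2
              subst ht0
              rcases hkn with ⟨rfl, -⟩
              simp at hsmall
            simp [hend, hms']
          · simp [hend]
      · have hms : pvMs new_c (m :: t) = pvMs new_c t := by
          simp [pvMs, hm]
        have hkeq : pvKept new_c (m :: t) = m :: pvKept new_c t := by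
          simp [pvKept, hm]
        rw [hms, hkeq]
        have hkm : ∀ x ∈ kept ++ [m], (x.1 == new_c) = false := by
          intro x hx
          rcases List.mem_append.mp hx with hx | hx
          · exact hk x hx
          · simp only [List.mem_singleton] at hx; subst hx; simpa using hm
        have hih := ih (kept ++ [m]) pre post h h' hkm
        rw [List.append_assoc, List.singleton_append] at hih
        rw [hih]
        simp only [List.append_assoc, List.singleton_append]

-- A's whole removal pass: prune becomes exactly B's rebuilt prune
lemma pvR2 (new_c : Int) : ∀ (rest pre : List (Int × List (Int × Int))),
    (((pre ++ rest).map Prod.fst).Nodup) →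
    ((rest.filterMap (pvDCell new_c)).foldl
        (fun pr pc => pc.2.foldl (fun pr cm => pvRemoveEdgeA pr pc.1 cm.1 cm.2) pr)
        (PySem.Dict.mk (pre ++ rest)))
      = PySem.Dict.mk (pre ++ rest.filterMap (pvBCell new_c)) := by
  intro rest
  induction rest with
  | nil => intro pre _; simp
  | cons pc rest ih =>
      intro pre hnd
      obtain ⟨p, l⟩ := pc
      have hnd' : (pre.map Prod.fst).Nodup ∧ (p :: rest.map Prod.fst).Nodup ∧
          ∀ a ∈ pre.map Prod.fst, ∀ b ∈ p :: rest.map Prod.fst, a ≠ b := by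
        have h0 := hnd
        rw [List.map_append, List.map_cons, List.nodup_append] at h0
        simpa using h0
      have hpre : ∀ c ∈ pre, (c.1 == p) = false := by
        intro c hc
        simp only [beq_eq_false_iff_ne]
        intro habs
        exact hnd'.2.2 c.1 (List.mem_map_of_mem hc) p (by simp) habs
      have hpn : p ∉ rest.map Prod.fst := (List.nodup_cons.mp hnd'.2.1).1
      have hpost : ∀ c ∈ rest, (c.1 == p) = false := by
        intro c hc
        simp only [beq_eq_false_iff_ne]
        intro habs
        exact hpn (by rw [← habs]; exact List.mem_map_of_mem hc)
      by_cases hms : pvMs new_c l = []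
      · have hcell : pvDCell new_c (p, l) = none := by simp [pvDCell, hms]
        have hkl := pvFilterNil_of_msNil new_c l hms
        have hbc : pvBCell new_c (p, l) = some (p, l) := by
          unfold pvBCell
          rw [if_neg (by rw [hkl]; tauto), hkl]
        simp only [List.filterMap_cons, hcell, hbc]
        have hsplit : pre ++ (p, l) :: rest = (pre ++ [(p, l)]) ++ rest := by simp
        rw [hsplit, ih (pre ++ [(p, l)]) (by simpa using hnd)]
        simp
      · have hcell : pvDCell new_c (p, l) = some (p, pvMs new_c l) := by simp [pvDCell, hms]
        simp only [List.filterMap_cons, hcell, List.foldl_cons]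
        have hfirst := pvR1 new_c p l [] pre rest hpre hpost (by simp)
        simp only [List.nil_append] at hfirst
        rw [hfirst]
        have hlne : l ≠ [] := by rintro rfl; simp [pvMs] at hms
        by_cases hkl : pvKept new_c l = []
        · -- the whole cell disappears
          rw [if_pos ⟨by simpa using hkl, hms⟩]
          have hbc : pvBCell new_c (p, l) = none := by
            unfold pvBCell; rw [if_pos ⟨hkl, hlne⟩]
          simp only [List.append_nil, hbc]
          have hnd2 : ((pre ++ rest).map Prod.fst).Nodup := by
            rw [List.map_append, List.nodup_append]
            exact ⟨hnd'.1, (List.nodup_cons.mp hnd'.2.1).2,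
              fun a ha => by
                have := hnd'.2.2 a ha
                intro b hb
                exact this b (by simp [hb])⟩
          exact ih pre hnd2
        · -- the cell stays with the kept children
          rw [if_neg (by simp [hkl])]
          have hbc : pvBCell new_c (p, l) = some (p, pvKept new_c l) := by
            unfold pvBCell; rw [if_neg (by tauto)]
          simp only [hbc]
          have hsplit : pre ++ [(p, pvKept new_c l)] ++ rest
              = (pre ++ [(p, pvKept new_c l)]) ++ rest := by simp
          rw [hsplit, ih (pre ++ [(p, pvKept new_c l)]) (by
            have hkeys : (((pre ++ [(p, pvKept new_c l)]) ++ rest).map Prod.fst)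
                = ((pre ++ (p, l) :: rest).map Prod.fst) := by simp
            rw [hkeys]; exact hnd)]
          simp

-- A's program, with the paired loops split into independent folds
lemma pvA_eq (prune cand : List (Int × List (Int × Int))) (new_c : Int)
    (hnd : (prune.map Prod.fst).Nodup) :
    unprune_new_cands prune cand new_c
      = ((PySem.Dict.mk (prune.filterMap (pvBCell new_c))).items,
         (prune.foldl (pvAcc new_c) (PySem.Dict.mk cand)).items) := by
  have hsplit : ∀ (st : PySem.Dict Int (List (Int × Int)) × PySem.Dict Int (List (Int × Int)))
      (pc : Int × List (Int × Int)),
      pc.2.foldl (fun st cm =>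
          if cm.1 == new_c then (pvAddEdgeA st.1 pc.1 cm.1 cm.2, pvAddEdgeA st.2 pc.1 cm.1 cm.2)
          else st) st
        = (pvAcc new_c st.1 pc, pvAcc new_c st.2 pc) := by
    intro st pc
    obtain ⟨s1, s2⟩ := st
    have hfun : (fun (st : PySem.Dict Int (List (Int × Int)) × PySem.Dict Int (List (Int × Int))) cm =>
        if cm.1 == new_c then (pvAddEdgeA st.1 pc.1 cm.1 cm.2, pvAddEdgeA st.2 pc.1 cm.1 cm.2) else st)
        = (fun st cm =>
            ((fun cd (cm : Int × Int) => if cm.1 == new_c then cd.modify pc.1 [] (fun cs => cs ++ [(cm.1, cm.2)]) else cd) st.1 cm,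
             (fun cd (cm : Int × Int) => if cm.1 == new_c then cd.modify pc.1 [] (fun cs => cs ++ [(cm.1, cm.2)]) else cd) st.2 cm)) := by
      funext st cm
      by_cases hcm : (cm.1 == new_c) = true <;> simp [hcm, pvAddEdgeA_eq_modify]
    rw [hfun]
    exact PySem.List.foldl_prod_mk (fun cd (cm : Int × Int) => if cm.1 == new_c then PySem.Dict.modify cd pc.1 [] (fun cs => cs ++ [(cm.1, cm.2)]) else cd) (fun cd (cm : Int × Int) => if cm.1 == new_c then PySem.Dict.modify cd pc.1 [] (fun cs => cs ++ [(cm.1, cm.2)]) else cd) pc.2 s1 s2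
  have houter : (fun (st : PySem.Dict Int (List (Int × Int)) × PySem.Dict Int (List (Int × Int))) pc =>
      pc.2.foldl (fun st cm =>
          if cm.1 == new_c then (pvAddEdgeA st.1 pc.1 cm.1 cm.2, pvAddEdgeA st.2 pc.1 cm.1 cm.2)
          else st) st)
      = (fun st pc => ((fun d pc => pvAcc new_c d pc) st.1 pc, (fun d pc => pvAcc new_c d pc) st.2 pc)) := by
    funext st pc; exact hsplit st pc
  show (_, _) = _
  simp only [houter, PySem.List.foldl_prod_mk]
  have hdisc : prune.foldl (pvAcc new_c) (PySem.Dict.mk []) 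
      = PySem.Dict.mk (prune.filterMap (pvDCell new_c)) := by
    rw [pvDisc_items new_c prune (PySem.Dict.mk []) hnd
        (fun q _ => by simp [PySem.Dict.contains])]
    rfl
  rw [hdisc]
  have hr2 := pvR2 new_c prune [] (by simpa using hnd)
  simp only [List.nil_append] at hr2
  exact congrArg (fun d => ((d : PySem.Dict Int (List (Int × Int))).items,
    (List.foldl (pvAcc new_c) (PySem.Dict.mk cand) prune).items)) hr2

-- B's program, with the paired loops split into independent folds
lemma pvB_eq (prune cand : List (Int × List (Int × Int))) (new_c : Int)
    (hnd : (prune.map Prod.fst).Nodup) :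
    unprune_new_cands_alt prune cand new_c
      = ((PySem.Dict.mk (prune.filterMap (pvBCell new_c))).items,
         (prune.foldl (pvAcc new_c) (PySem.Dict.mk cand)).items) := by
  have hsplit : ∀ (st : PySem.Dict Int (List (Int × Int)) × PySem.Dict Int (List (Int × Int)))
      (pc : Int × List (Int × Int)),
      (let r := pc.2.foldl
          (fun (r : PySem.Dict Int (List (Int × Int)) × List (Int × Int)) cm =>
            if cm.1 == new_c then (r.1.modify pc.1 [] (fun cs => cs ++ [(cm.1, cm.2)]), r.2)
            else (r.1, r.2 ++ [cm])) (st.2, [])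
       ((if ¬(r.2 = []) ∨ pc.2 = [] then st.1.insert pc.1 r.2 else st.1, r.1) :
         PySem.Dict Int (List (Int × Int)) × PySem.Dict Int (List (Int × Int))))
        = (pvNpStep new_c st.1 pc, pvAcc new_c st.2 pc) := by
    intro st pc
    obtain ⟨s1, s2⟩ := st
    have hfun : (fun (r : PySem.Dict Int (List (Int × Int)) × List (Int × Int)) cm =>
        if cm.1 == new_c then (r.1.modify pc.1 [] (fun cs => cs ++ [(cm.1, cm.2)]), r.2)
        else (r.1, r.2 ++ [cm]))
        = (fun r cm =>
            ((fun cd (cm : Int × Int) => if cm.1 == new_c then cd.modify pc.1 [] (fun cs => cs ++ [(cm.1, cm.2)]) else cd) r.1 cm,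
             (fun (k : List (Int × Int)) cm => if cm.1 == new_c then k else k ++ [cm]) r.2 cm)) := by
      funext r cm
      by_cases hcm : (cm.1 == new_c) = true <;> simp [hcm]
    have hfold := PySem.List.foldl_prod_mk
      (fun cd (cm : Int × Int) => if cm.1 == new_c then PySem.Dict.modify cd pc.1 [] (fun cs => cs ++ [(cm.1, cm.2)]) else cd)
      (fun (k : List (Int × Int)) cm => if cm.1 == new_c then k else k ++ [cm]) pc.2 s2 ([] : List (Int × Int))
    dsimp only
    rw [hfun, hfold]
    have hkept : pc.2.foldl (fun (k : List (Int × Int)) cm => if cm.1 == new_c then k else k ++ [cm]) []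
        = pvKept new_c pc.2 := by
      have hfun2 : (fun (k : List (Int × Int)) cm => if cm.1 == new_c then k else k ++ [cm])
          = (fun k cm => if !(cm.1 == new_c) then k ++ [cm] else k) := by
        funext k cm
        by_cases hcm : (cm.1 == new_c) = true <;> simp [hcm]
      rw [hfun2, PySem.List.foldl_append_if_eq_filter]
      rfl
    simp only [hkept]
    rfl
  have houter : (fun (st : PySem.Dict Int (List (Int × Int)) × PySem.Dict Int (List (Int × Int))) pc =>
      (let r := pc.2.foldl
          (fun (r : PySem.Dict Int (List (Int × Int)) × List (Int × Int)) cm =>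
            if cm.1 == new_c then (r.1.modify pc.1 [] (fun cs => cs ++ [(cm.1, cm.2)]), r.2)
            else (r.1, r.2 ++ [cm])) (st.2, [])
       ((if ¬(r.2 = []) ∨ pc.2 = [] then st.1.insert pc.1 r.2 else st.1, r.1) :
         PySem.Dict Int (List (Int × Int)) × PySem.Dict Int (List (Int × Int)))))
      = (fun st pc => ((fun d pc => pvNpStep new_c d pc) st.1 pc, (fun d pc => pvAcc new_c d pc) st.2 pc)) := by
    funext st pc; exact hsplit st pc
  show (_, _) = _
  simp only [houter, PySem.List.foldl_prod_mk]
  rw [pvNp_items new_c prune (PySem.Dict.mk []) hnd (fun q _ => by simp [PySem.Dict.contains])]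
  rfl

theorem unprune_new_cands_spec : Claim_equal_unprune_new_cands := by
  intro prune cand new_c _ hpre
  unfold Spec_unprune_new_cands
  rw [pvA_eq prune cand new_c hpre.1, pvB_eq prune cand new_c hpre.1]
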